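-- pv_equiv track=rewrite | github.com/yeipills/test | backend/app/algorithms/substitution_engine.py | _similar_category
-- ===== SOURCE A (Python) =====
-- def _similar_category(cat1: str, cat2: str) -> bool:
--     """Verifica si dos categorías son similares"""
--     # Mapeo de categorías similares
--     similar_groups = [
--         {"dairy", "milk", "yogurt", "cheese"},
--         {"fruit", "fruits", "fresh_fruit"},
--         {"vegetable", "vegetables", "fresh_vegetables"},
--         {"meat", "poultry", "beef", "chicken"},
--         {"bread", "bakery", "cereals"},
--         {"beverages", "drinks", "juice", "soda"},
--     ]
--
--     cat1_lower = cat1.lower()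
--     cat2_lower = cat2.lower()
--
--     for group in similar_groups:
--         if cat1_lower in group and cat2_lower in group:
--             return True
--
--     return False
-- ===== SOURCE B (Python) =====
-- _SIMILAR_GROUPS = [
--     ["dairy", "milk", "yogurt", "cheese"],
--     ["fruit", "fruits", "fresh_fruit"],
--     ["vegetable", "vegetables", "fresh_vegetables"],
--     ["meat", "poultry", "beef", "chicken"],
--     ["bread", "bakery", "cereals"],
--     ["beverages", "drinks", "juice", "soda"],
-- ]
--
-- # inverted index: category -> group number (groups are disjoint)
-- _GROUP_INDEX = {cat: i for i, group in enumerate(_SIMILAR_GROUPS) for cat in group}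
--
--
-- def _similar_category(cat1: str, cat2: str) -> bool:
--     """Verifica si dos categorías son similares"""
--     g1 = _GROUP_INDEX.get(cat1.lower())
--     return g1 is not None and g1 == _GROUP_INDEX.get(cat2.lower())
-- ===== Notes on version B (the rewrite author's own statement) =====
-- stated objective: idiomatic
-- what changed: Replaced the per-call scan over the six similarity groups by a module-level precomputed inverted dict (category -> group index); the function is now two dict lookups and an index comparison, relying on the groups being disjoint.
import Mathlib
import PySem

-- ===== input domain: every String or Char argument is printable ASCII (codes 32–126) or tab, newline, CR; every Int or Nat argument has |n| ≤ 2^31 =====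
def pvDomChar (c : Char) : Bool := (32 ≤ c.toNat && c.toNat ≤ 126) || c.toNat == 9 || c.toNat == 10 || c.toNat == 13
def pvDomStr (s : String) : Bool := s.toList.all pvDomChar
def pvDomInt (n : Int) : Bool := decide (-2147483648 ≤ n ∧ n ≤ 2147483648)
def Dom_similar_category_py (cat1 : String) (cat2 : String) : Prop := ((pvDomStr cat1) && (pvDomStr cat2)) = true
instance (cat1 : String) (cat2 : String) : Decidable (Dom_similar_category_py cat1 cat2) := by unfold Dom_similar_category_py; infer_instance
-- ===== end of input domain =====

-- B replaces A's scan over the six groups by a single precomputed inverted index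
-- (category -> group number) and one dict lookup per argument (objective: idiomatic).

-- ===== PORT A =====
-- the six literal similarity groups of A (Python sets of distinct strings)
def pvGroupsA : List (PySem.Set String) :=
  [ PySem.Set.ofList ["dairy", "milk", "yogurt", "cheese"],
    PySem.Set.ofList ["fruit", "fruits", "fresh_fruit"],
    PySem.Set.ofList ["vegetable", "vegetables", "fresh_vegetables"],
    PySem.Set.ofList ["meat", "poultry", "beef", "chicken"],
    PySem.Set.ofList ["bread", "bakery", "cereals"],
    PySem.Set.ofList ["beverages", "drinks", "juice", "soda"] ]

-- the 'for group in similar_groups: if … return True' loop with early return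
def pvLoopA : List (PySem.Set String) → String → String → Bool
  | [], _, _ => false
  | g :: rest, c1, c2 =>
      if g.contains c1 && g.contains c2 then true else pvLoopA rest c1 c2

def similar_category_py (cat1 : String) (cat2 : String) : Bool :=
  let cat1_lower := PySem.Str.lower cat1
  let cat2_lower := PySem.Str.lower cat2
  pvLoopA pvGroupsA cat1_lower cat2_lower

-- ===== PORT B =====
-- B's own literal group table (lists in Source B)
def pvGroupsB : List (List String) :=
  [ ["dairy", "milk", "yogurt", "cheese"],
    ["fruit", "fruits", "fresh_fruit"],
    ["vegetable", "vegetables", "fresh_vegetables"],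
    ["meat", "poultry", "beef", "chicken"],
    ["bread", "bakery", "cereals"],
    ["beverages", "drinks", "juice", "soda"] ]

-- {cat: i for i, group in enumerate(_SIMILAR_GROUPS) for cat in group}
def pvGroupIndex : PySem.Dict String Int :=
  ((PySem.List.enumerate pvGroupsB 0).flatMap (fun p => p.2.map (fun c => (c, p.1)))).foldl
    (fun d kv => d.insert kv.1 kv.2) PySem.Dict.empty

def similar_category_py_alt (cat1 : String) (cat2 : String) : Bool :=
  let g1 := pvGroupIndex.get? (PySem.Str.lower cat1)
  g1.isSome && (g1 == pvGroupIndex.get? (PySem.Str.lower cat2))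

-- ===== PRECONDITION & SPEC =====
def Spec_similar_category_py (cat1 : String) (cat2 : String) (out : Bool) : Prop := out = similar_category_py_alt cat1 cat2
instance (cat1 : String) (cat2 : String) (out : Bool) : Decidable (Spec_similar_category_py cat1 cat2 out) := by unfold Spec_similar_category_py; infer_instance

-- ===== CLAIM (what is proved, stated in full; the proofs are below) =====
def Claim_equal_similar_category_py : Prop := ∀ (cat1 : String) (cat2 : String), Dom_similar_category_py cat1 cat2 → Spec_similar_category_py cat1 cat2 (similar_category_py cat1 cat2)

-- ===== LEMMAS AND PROOFS =====

-- the 22 category strings occurring in the tables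
def pvAllCats : List String :=
  ["dairy", "milk", "yogurt", "cheese", "fruit", "fruits", "fresh_fruit",
   "vegetable", "vegetables", "fresh_vegetables", "meat", "poultry", "beef",
   "chicken", "bread", "bakery", "cereals", "beverages", "drinks", "juice", "soda"]

lemma pvLoopA_false_left (a b : String) (h : a ∉ pvAllCats) :
    pvLoopA pvGroupsA a b = false := by
  simp only [pvAllCats, List.mem_cons, List.not_mem_nil, or_false] at h
  push Not at h
  simp [pvLoopA, pvGroupsA, PySem.Set.ofList, PySem.Set.contains, h]

lemma pvLoopA_false_right (a b : String) (h : b ∉ pvAllCats) :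
    pvLoopA pvGroupsA a b = false := by
  simp only [pvAllCats, List.mem_cons, List.not_mem_nil, or_false] at h
  push Not at h
  simp [pvLoopA, pvGroupsA, PySem.Set.ofList, PySem.Set.contains, h]

lemma pvIndex_none (s : String) (h : s ∉ pvAllCats) :
    pvGroupIndex.get? s = none := by
  simp only [pvAllCats, List.mem_cons, List.not_mem_nil, or_false] at h
  push Not at h
  simp [pvGroupIndex, pvGroupsB, PySem.List.enumerate, PySem.Dict.get?_insert, h]

lemma pvCore (a b : String) :
    pvLoopA pvGroupsA a b =
      ((pvGroupIndex.get? a).isSome && (pvGroupIndex.get? a == pvGroupIndex.get? b)) := by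
  by_cases ha : a ∈ pvAllCats
  · by_cases hb : b ∈ pvAllCats
    · fin_cases ha <;> fin_cases hb <;> decide
    · rw [pvLoopA_false_right a b hb, pvIndex_none b hb]
      cases pvGroupIndex.get? a <;> simp
  · rw [pvLoopA_false_left a b ha, pvIndex_none a ha]
    simp

-- ===== VERDICT (by name: the statement is the Claim_ definition above) =====
theorem similar_category_py_spec : Claim_equal_similar_category_py := by
  intro cat1 cat2 _
  unfold Spec_similar_category_py similar_category_py similar_category_py_alt
  exact pvCore (PySem.Str.lower cat1) (PySem.Str.lower cat2)
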